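-- pv_equiv track=rewrite | github.com/xoth42/QNN-hack | tuple_triangle.py | round_robin_circuit
-- ===== SOURCE A (Python) =====
-- def round_robin_circuit(n):
--     """
--     Round-robin circuit (Figure 9d) - dense all-to-all connections.
--     Depth: n-1
--
--     Most expressive pattern with maximum connectivity.
--     Each qubit eventually connects to every other qubit.
--     """
--     output_list = []
--
--     # Each layer connects qubits with a specific stride
--     for stride in range(1, n):
--         connections = []
--         for i in range(1, n + 1):
--             j = i + stride
--             if j <= n:
--                 connections.append((i, j))
--
--         if connections:
--             output_list.append(connections)
--
--     return output_list
-- ===== SOURCE B (Python) =====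
-- def round_robin_circuit(n):
--     """
--     Round-robin circuit (Figure 9d) - dense all-to-all connections.
--
--     Builds the stride-1 layer once, then derives each subsequent layer
--     from the previous one: drop its last pair and advance every second
--     endpoint by one, until the layer runs empty.
--     """
--     out = []
--     layer = [(i, i + 1) for i in range(1, n)]
--     while layer:
--         out.append(layer)
--         layer = [(i, j + 1) for (i, j) in layer[:-1]]
--     return out
-- ===== Notes on version B (the rewrite author's own statement) =====
-- stated objective: alternative
-- what changed: Instead of rebuilding each stride layer from scratch with an inner bounded loop, B constructs the stride-1 layer once and derives every further layer incrementally from the previous one (drop the last pair, bump each right endpoint), stopping when the layer empties.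
import Mathlib
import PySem

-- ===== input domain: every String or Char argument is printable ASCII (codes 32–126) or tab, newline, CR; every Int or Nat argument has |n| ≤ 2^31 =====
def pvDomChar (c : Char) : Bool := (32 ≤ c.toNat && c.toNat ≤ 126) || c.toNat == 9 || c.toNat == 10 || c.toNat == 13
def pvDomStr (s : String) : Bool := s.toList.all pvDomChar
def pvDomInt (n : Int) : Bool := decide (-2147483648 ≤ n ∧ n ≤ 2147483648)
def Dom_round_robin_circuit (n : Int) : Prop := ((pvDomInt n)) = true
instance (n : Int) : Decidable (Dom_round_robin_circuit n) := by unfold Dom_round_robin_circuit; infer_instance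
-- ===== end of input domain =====

-- B derives each stride layer incrementally from the previous one instead of rebuilding every layer from scratch (alternative decomposition, same cost).


-- ===== PORT A =====
def round_robin_circuit (n : Int) : List (List (Int × Int)) :=
  (PySem.List.pyRange 1 n 1).foldl
    (fun output_list stride =>
      let connections :=
        (PySem.List.pyRange 1 (n + 1) 1).foldl
          (fun cs i =>
            let j := i + stride
            if j ≤ n then cs ++ [(i, j)] else cs)
          []
      if connections ≠ [] then output_list ++ [connections] else output_list)
    []

-- ===== PORT B =====
-- B's while loop as structural recursion on the layer; layer[:-1] is PySem.List.slice layer none (some (-1)).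
def pvLoop (layer : List (Int × Int)) (out : List (List (Int × Int))) : List (List (Int × Int)) :=
  if layer = [] then out
  else pvLoop ((PySem.List.slice layer none (some (-1))).map (fun p => (p.1, p.2 + 1))) (out ++ [layer])
termination_by layer.length
decreasing_by
  simp only [PySem.List.slice_to_neg_one, List.length_map, List.length_dropLast]
  have := List.length_pos_of_ne_nil (by assumption : layer ≠ [])
  omega

def round_robin_circuit_alt (n : Int) : List (List (Int × Int)) :=
  pvLoop ((PySem.List.pyRange 1 n 1).map (fun i => (i, i + 1))) []

-- ===== PRECONDITION & SPEC =====
def Spec_round_robin_circuit (n : Int) (out : List (List (Int × Int))) : Prop := out = round_robin_circuit_alt n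
instance (n : Int) (out : List (List (Int × Int))) : Decidable (Spec_round_robin_circuit n out) := by unfold Spec_round_robin_circuit; infer_instance

-- ===== CLAIM (what is proved, stated in full; the proofs are below) =====
def Claim_equal_round_robin_circuit : Prop := ∀ (n : Int), Dom_round_robin_circuit n → Spec_round_robin_circuit n (round_robin_circuit n)

-- ===== LEMMAS AND PROOFS =====

-- A's per-stride connection list, in closed form (filter-then-map over the i range).
def pvC (n s : Int) : List (Int × Int) :=
  ((PySem.List.pyRange 1 (n + 1) 1).filter (fun i => decide (i + s ≤ n))).map (fun i => (i, i + s))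

-- the layer B holds at stride s
def pvLayerAt (n s : Int) : List (Int × Int) :=
  (PySem.List.pyRange 1 (n - s + 1) 1).map (fun i => (i, i + s))

lemma pvA_eq (n : Int) :
    round_robin_circuit n =
      ((PySem.List.pyRange 1 n 1).filter (fun s => decide (pvC n s ≠ []))).map (pvC n) := by
  unfold round_robin_circuit pvC
  simp only [PySem.List.foldl_append_ite, List.nil_append]

lemma pv_mem_C (n s : Int) (h1 : 1 ≤ s) (h2 : s < n) : (1, 1 + s) ∈ pvC n s := by
  unfold pvC
  refine List.mem_map.mpr ⟨1, List.mem_filter.mpr ⟨?_, ?_⟩, rfl⟩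
  · exact PySem.List.mem_pyRange_one.mpr (by omega)
  · simp; omega

lemma pvA_eq_map (n : Int) :
    round_robin_circuit n = (PySem.List.pyRange 1 n 1).map (pvC n) := by
  rw [pvA_eq, List.filter_eq_self.mpr]
  intro s hs
  have hb := PySem.List.mem_pyRange_one.mp hs
  simpa using List.ne_nil_of_mem (pv_mem_C n s hb.1 hb.2)

lemma pv_dropLast_pyRange (a b : Int) :
    (PySem.List.pyRange a b 1).dropLast = PySem.List.pyRange a (b - 1) 1 := by
  by_cases h : a ≤ b - 1
  · have hr := PySem.List.pyRange_one_succ_right (a := a) (b := b - 1) h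
    rw [show b - 1 + 1 = b by ring] at hr
    rw [hr, List.dropLast_concat]
  · rw [PySem.List.pyRange_one_eq_nil (by omega), PySem.List.pyRange_one_eq_nil (by omega)]
    rfl

lemma pv_next_layer (n s : Int) :
    (pvLayerAt n s).dropLast.map (fun p => (p.1, p.2 + 1)) = pvLayerAt n (s + 1) := by
  unfold pvLayerAt
  rw [← List.map_dropLast, pv_dropLast_pyRange, List.map_map]
  rw [show n - s + 1 - 1 = n - (s + 1) + 1 by ring]
  exact List.map_congr_left (fun i _ => by simp [Function.comp]; ring)

lemma pv_layerAt_eq_nil (n s : Int) (h : n ≤ s) : pvLayerAt n s = [] := by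
  unfold pvLayerAt
  rw [PySem.List.pyRange_one_eq_nil (by omega)]
  rfl

lemma pv_layerAt_ne_nil (n s : Int) (h2 : s < n) : pvLayerAt n s ≠ [] := by
  unfold pvLayerAt
  refine List.ne_nil_of_mem (List.mem_map.mpr ⟨1, PySem.List.mem_pyRange_one.mpr (by omega), rfl⟩)

lemma pv_loop_inv (n : Int) (k : Nat) :
    ∀ (s : Int) (acc : List (List (Int × Int))), 1 ≤ s → (n - s).toNat = k →
      pvLoop (pvLayerAt n s) acc = acc ++ (PySem.List.pyRange s n 1).map (pvLayerAt n) := by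
  induction k with
  | zero =>
      intro s acc hs hk
      rw [pvLoop, if_pos (pv_layerAt_eq_nil n s (by omega)),
          PySem.List.pyRange_one_eq_nil (by omega), List.map_nil, List.append_nil]
  | succ k ih =>
      intro s acc hs hk
      rw [pvLoop, if_neg (pv_layerAt_ne_nil n s (by omega)),
          PySem.List.slice_to_neg_one, pv_next_layer,
          ih (s + 1) (acc ++ [pvLayerAt n s]) (by omega) (by omega),
          PySem.List.pyRange_one_cons (show s < n by omega), List.map_cons,
          List.append_assoc, List.singleton_append]

lemma pv_filter_range_le (c a b : Int) :
    (PySem.List.pyRange a b 1).filter (fun i => decide (i ≤ c)) =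
      PySem.List.pyRange a (min b (c + 1)) 1 := by
  by_cases hab : a < b
  · rw [PySem.List.pyRange_one_cons hab, List.filter_cons]
    have ih := pv_filter_range_le c (a + 1) b
    by_cases hc : a ≤ c
    · rw [if_pos (by simpa using hc), ih,
          ← PySem.List.pyRange_one_cons (show a < min b (c + 1) by omega)]
    · rw [if_neg (by simpa using hc), ih,
          PySem.List.pyRange_one_eq_nil (show min b (c + 1) ≤ a + 1 by omega),
          PySem.List.pyRange_one_eq_nil (show min b (c + 1) ≤ a by omega)]
  · rw [PySem.List.pyRange_one_eq_nil (by omega),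
        PySem.List.pyRange_one_eq_nil (show min b (c + 1) ≤ a by omega)]
    rfl
termination_by (b - a).toNat
decreasing_by omega

lemma pv_C_eq_layerAt (n s : Int) (h1 : 1 ≤ s) : pvC n s = pvLayerAt n s := by
  unfold pvC pvLayerAt
  rw [List.filter_congr (fun i _ => show decide (i + s ≤ n) = decide (i ≤ n - s) from
        decide_eq_decide.mpr (by omega)),
      pv_filter_range_le (n - s) 1 (n + 1),
      show min (n + 1) (n - s + 1) = n - s + 1 by omega]

-- ===== VERDICT (by name: the statement is the Claim_ definition above) =====
theorem round_robin_circuit_spec : Claim_equal_round_robin_circuit := by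
  intro n _
  unfold Spec_round_robin_circuit
  have hinit : (PySem.List.pyRange 1 n 1).map (fun i => (i, i + 1)) = pvLayerAt n 1 := by
    unfold pvLayerAt
    rw [show n - 1 + 1 = n by ring]
  rw [pvA_eq_map n]
  unfold round_robin_circuit_alt
  rw [hinit, pv_loop_inv n (n - 1).toNat 1 [] (by omega) (by omega), List.nil_append]
  exact List.map_congr_left (fun s hs =>
    pv_C_eq_layerAt n s (PySem.List.mem_pyRange_one.mp hs).1)
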